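-- pv_equiv track=rewrite | github.com/x31337/zscaler | host/zscaler_host.py | categorize_ips
-- ===== SOURCE A (Python) =====
-- def is_docker_ip(ip):
--     """Check if an IP belongs to Docker network (172.17.x.x)"""
--     return ip.startswith('172.17.')
--
-- def is_private_ip(ip):
--     """Check if an IP is in private IP ranges (RFC1918)"""
--     return (ip.startswith('10.') or
--             ip.startswith('172.16.') or
--             ip.startswith('172.18.') or
--             ip.startswith('172.19.') or
--             ip.startswith('172.2') or  # Covers 172.20.x.x through 172.29.x.x
--             ip.startswith('172.30.') or
--             ip.startswith('172.31.') or
--             ip.startswith('192.168.'))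
--
-- def is_non_private_ip(ip):
--     """Check if an IP is not in private IP ranges and not a Docker IP"""
--     return not (is_private_ip(ip) or is_docker_ip(ip) or
--                 ip.startswith('127.') or ip.startswith('169.254.'))
--
-- def categorize_ips(ips):
--     """Categorize IPs into Docker, private, and non-private"""
--     result = {
--         "docker": None,
--         "private": None,
--         "nonPrivate": None
--     }
--
--     # Filter out loopback and link-local addresses
--     valid_ips = [ip for ip in ips if not ip.startswith('127.') and not ip.startswith('169.254.')]
--
--     if not valid_ips:
--         return result
--
--     # Find Docker IP
--     docker_ips = [ip for ip in valid_ips if is_docker_ip(ip)]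
--     if docker_ips:
--         result["docker"] = docker_ips[0]
--
--     # Find non-private IP
--     non_private_ips = [ip for ip in valid_ips if is_non_private_ip(ip)]
--     if non_private_ips:
--         result["nonPrivate"] = non_private_ips[0]
--
--     # Find private IP (excluding Docker)
--     private_ips = [ip for ip in valid_ips if is_private_ip(ip)]
--     if private_ips:
--         result["private"] = private_ips[0]
--
--     return result
-- ===== SOURCE B (Python) =====
-- def is_docker_ip(ip):
--     """Check if an IP belongs to Docker network (172.17.x.x)"""
--     return ip.startswith('172.17.')
--
-- def is_private_ip(ip):
--     """Check if an IP is in private IP ranges (RFC1918)"""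
--     return (ip.startswith('10.') or
--             ip.startswith('172.16.') or
--             ip.startswith('172.18.') or
--             ip.startswith('172.19.') or
--             ip.startswith('172.2') or
--             ip.startswith('172.30.') or
--             ip.startswith('172.31.') or
--             ip.startswith('192.168.'))
--
-- def is_non_private_ip(ip):
--     """Check if an IP is not in private IP ranges and not a Docker IP"""
--     return not (is_private_ip(ip) or is_docker_ip(ip) or
--                 ip.startswith('127.') or ip.startswith('169.254.'))
--
-- def categorize_ips(ips):
--     """Categorize IPs into Docker, private, and non-private (single forward scan)."""
--     result = {"docker": None, "private": None, "nonPrivate": None}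
--     for ip in ips:
--         if ip.startswith('127.') or ip.startswith('169.254.'):
--             continue
--         if result["docker"] is None and is_docker_ip(ip):
--             result["docker"] = ip
--         if result["nonPrivate"] is None and is_non_private_ip(ip):
--             result["nonPrivate"] = ip
--         if result["private"] is None and is_private_ip(ip):
--             result["private"] = ip
--     return result
-- ===== Notes on version B (the rewrite author's own statement) =====
-- stated objective: simpler
-- what changed: Replaced A's intermediate valid-IP list plus three separate filter-and-take-[0] passes with one forward scan that records each category's first match in its slot.
import Mathlib
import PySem

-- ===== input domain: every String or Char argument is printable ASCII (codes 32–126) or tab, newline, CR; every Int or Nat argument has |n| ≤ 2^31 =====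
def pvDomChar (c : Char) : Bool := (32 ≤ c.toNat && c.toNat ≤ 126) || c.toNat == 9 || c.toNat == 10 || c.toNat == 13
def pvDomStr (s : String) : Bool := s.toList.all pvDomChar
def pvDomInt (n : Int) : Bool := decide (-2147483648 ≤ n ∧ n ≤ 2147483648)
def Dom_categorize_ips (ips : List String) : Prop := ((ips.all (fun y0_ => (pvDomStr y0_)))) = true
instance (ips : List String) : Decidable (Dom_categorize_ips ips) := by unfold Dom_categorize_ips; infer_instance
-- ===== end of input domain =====

-- B replaces A's valid-IP list plus three filter-and-[0] passes with ONE forward scan filling each slot on first match (objective: simpler).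
-- ===== PORT A =====
def is_docker_ip (ip : String) : Bool := PySem.Str.startswith ip "172.17."

def is_private_ip (ip : String) : Bool :=
  PySem.Str.startswith ip "10." ||
  PySem.Str.startswith ip "172.16." ||
  PySem.Str.startswith ip "172.18." ||
  PySem.Str.startswith ip "172.19." ||
  PySem.Str.startswith ip "172.2" ||
  PySem.Str.startswith ip "172.30." ||
  PySem.Str.startswith ip "172.31." ||
  PySem.Str.startswith ip "192.168."

def is_non_private_ip (ip : String) : Bool :=
  !(is_private_ip ip || is_docker_ip ip ||
    PySem.Str.startswith ip "127." || PySem.Str.startswith ip "169.254.")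

def categorize_ips (ips : List String) : List (String × Option String) :=
  let valid_ips := ips.filter (fun ip => !PySem.Str.startswith ip "127." && !PySem.Str.startswith ip "169.254.")
  if valid_ips.isEmpty then
    [("docker", none), ("private", none), ("nonPrivate", none)]
  else
    let docker := (valid_ips.filter is_docker_ip).head?
    let nonPrivate := (valid_ips.filter is_non_private_ip).head?
    let priv := (valid_ips.filter is_private_ip).head?
    [("docker", docker), ("private", priv), ("nonPrivate", nonPrivate)]

-- ===== PORT B =====
def categorize_ips_alt_go : List String → Option String → Option String → Option String → Option String × Option String × Option String
  | [], d, p, n => (d, p, n)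
  | ip :: rest, d, p, n =>
    if PySem.Str.startswith ip "127." || PySem.Str.startswith ip "169.254." then
      categorize_ips_alt_go rest d p n
    else
      let d' := if d = none && is_docker_ip ip then some ip else d
      let n' := if n = none && is_non_private_ip ip then some ip else n
      let p' := if p = none && is_private_ip ip then some ip else p
      categorize_ips_alt_go rest d' p' n'

def categorize_ips_alt (ips : List String) : List (String × Option String) :=
  let (d, p, n) := categorize_ips_alt_go ips none none none
  [("docker", d), ("private", p), ("nonPrivate", n)]

-- ===== PRECONDITION & SPEC =====
def Spec_categorize_ips (ips : List String) (out : List (String × Option String)) : Prop := out = categorize_ips_alt ips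
instance (ips : List String) (out : List (String × Option String)) : Decidable (Spec_categorize_ips ips out) := by unfold Spec_categorize_ips; infer_instance

-- ===== CLAIM (what is proved, stated in full; the proofs are below) =====
def Claim_equal_categorize_ips : Prop := ∀ (ips : List String), Dom_categorize_ips ips → Spec_categorize_ips ips (categorize_ips ips)

-- ===== LEMMAS AND PROOFS =====
theorem categorize_ips_alt_go_eq (ips : List String) (d p n : Option String) :
    categorize_ips_alt_go ips d p n =
      (d.orElse (fun _ => ((ips.filter (fun ip => !PySem.Str.startswith ip "127." && !PySem.Str.startswith ip "169.254.")).filter is_docker_ip).head?),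
       p.orElse (fun _ => ((ips.filter (fun ip => !PySem.Str.startswith ip "127." && !PySem.Str.startswith ip "169.254.")).filter is_private_ip).head?),
       n.orElse (fun _ => ((ips.filter (fun ip => !PySem.Str.startswith ip "127." && !PySem.Str.startswith ip "169.254.")).filter is_non_private_ip).head?)) := by
  induction ips generalizing d p n with
  | nil => cases d <;> cases p <;> cases n <;> rfl
  | cons ip rest ih =>
    by_cases h : (PySem.Str.startswith ip "127." || PySem.Str.startswith ip "169.254.") = true
    · have h1 : (!PySem.Str.startswith ip "127." && !PySem.Str.startswith ip "169.254.") = false := by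
        cases hb : PySem.Str.startswith ip "127." <;> cases hc : PySem.Str.startswith ip "169.254." <;>
          simp_all
      rw [categorize_ips_alt_go]
      rw [if_pos h, ih, List.filter_cons_of_neg (by simp only [h1]; exact Bool.false_ne_true)]
    · have h1 : (!PySem.Str.startswith ip "127." && !PySem.Str.startswith ip "169.254.") = true := by
        cases hb : PySem.Str.startswith ip "127." <;> cases hc : PySem.Str.startswith ip "169.254." <;>
          simp_all
      rw [categorize_ips_alt_go]
      rw [if_neg h, ih, List.filter_cons_of_pos (by simp only [h1])]
      refine Prod.ext ?_ (Prod.ext ?_ ?_)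
      · cases d <;> by_cases hd : is_docker_ip ip = true <;>
          simp [hd, Option.orElse, List.filter_cons]
      · cases p <;> by_cases hp : is_private_ip ip = true <;>
          simp [hp, Option.orElse, List.filter_cons]
      · cases n <;> by_cases hn : is_non_private_ip ip = true <;>
          simp [hn, Option.orElse, List.filter_cons]

-- ===== VERDICT (by name: the statement is the Claim_ definition above) =====
theorem categorize_ips_spec : Claim_equal_categorize_ips := by
  intro ips _
  unfold Spec_categorize_ips categorize_ips categorize_ips_alt
  rw [categorize_ips_alt_go_eq]
  by_cases h : (ips.filter (fun ip => !PySem.Str.startswith ip "127." && !PySem.Str.startswith ip "169.254.")).isEmpty = true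
  · rw [List.isEmpty_iff] at h
    simp only [h, List.filter_nil, List.isEmpty_nil, if_true, List.head?_nil, Option.orElse]
  · rw [Bool.not_eq_true] at h
    simp only [h, Bool.false_eq_true, if_false, Option.orElse]
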